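-- pv_equiv track=rewrite | github.com/daniel-reich/ubiquitous-fiesta | FwCZpyTZDH3QExXE2_6.py | amount_fib
-- ===== SOURCE A (Python) =====
-- def amount_fib(n):
--
--   if (n == 0):
--     return 0
--
--   if (n == 1):
--     return 1
--
--   Sequence = [0, 1]
--   New = Sequence[-2] + Sequence[-1]
--
--   while (New < n):
--     New = Sequence[-2] + Sequence[-1]
--     Sequence.append(New)
--
--   Events = 0
--   Counter = 0
--   Length = len(Sequence)
--
--   while (Counter < Length):
--
--     Item = Sequence[Counter]
--
--     if (Item < n):
--       Events += 1
--       Counter += 1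
--     else:
--       Counter += 1
--
--   return Events
-- ===== SOURCE B (Python) =====
-- def amount_fib(n):
--     # One fused loop with two rolling variables: generate 0,1,1,2,3,5,...
--     # and count each term below n.
--     a, b = 0, 1
--     count = 0
--     while a < n:
--         count += 1
--         a, b = b, a + b
--     return count
-- ===== Notes on version B (the rewrite author's own statement) =====
-- stated objective: simpler
-- what changed: Drops the list and the second counting pass: one loop with two rolling fib variables counts terms below n directly (no n==0/n==1 guards, no list build, no index scan).
import Mathlib
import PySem

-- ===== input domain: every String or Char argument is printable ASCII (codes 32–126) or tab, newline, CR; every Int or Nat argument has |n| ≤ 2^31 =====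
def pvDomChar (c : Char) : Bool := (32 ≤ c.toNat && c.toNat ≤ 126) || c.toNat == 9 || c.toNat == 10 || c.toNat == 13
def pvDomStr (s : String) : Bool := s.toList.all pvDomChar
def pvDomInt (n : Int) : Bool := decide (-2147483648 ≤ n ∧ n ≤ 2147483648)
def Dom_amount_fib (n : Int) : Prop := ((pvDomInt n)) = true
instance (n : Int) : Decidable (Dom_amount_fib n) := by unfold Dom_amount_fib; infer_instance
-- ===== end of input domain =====

-- B replaces A's list build + second counting pass by one fused loop with two
-- rolling fib variables (objective: simpler).

-- ===== PORT A =====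
-- A's first while loop: state is the Sequence together with its last two
-- elements a, b (so New = a + b; the condition `New < n` tested at the top is
-- the previously appended value, which is always the current last element b).
-- The proof arguments only record invariants of A's loop (0 ≤ a ≤ b, 1 ≤ b)
-- needed for termination; they do not change the computation.
def loopA (n a b : Int) (seq : List Int)
    (h0 : 0 ≤ a) (hab : a ≤ b) (hb : 1 ≤ b) : List Int :=
  if b < n then
    loopA n b (a + b) (seq ++ [a + b]) (le_trans h0 hab) (by omega) (by omega)
  else seq
termination_by ((n - b).toNat, (n - a).toNat)
decreasing_by
  rcases Int.lt_or_le 0 a with ha | ha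
  · exact Prod.Lex.left _ _ (by omega)
  · have h1 : (n - (a + b)).toNat = (n - b).toNat := by omega
    rw [h1]
    exact Prod.Lex.right _ (by omega)

-- A's second while loop: scan the sequence left to right, incrementing Events
-- for each item < n (Counter advances in both branches, as in A).
def countLoop (n : Int) (seq : List Int) (events : Int) : Int :=
  match seq with
  | [] => events
  | x :: rest => if x < n then countLoop n rest (events + 1) else countLoop n rest events

def amount_fib (n : Int) : Int :=
  if n = 0 then 0
  else if n = 1 then 1
  else
    countLoop n (loopA n 0 1 [0, 1] (by omega) (by omega) (by omega)) 0

-- ===== PORT B =====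
-- B's single while loop over rolling variables (a, b) and the counter.
-- Same invariant proof arguments for termination only.
def loopB (n a b count : Int) (h0 : 0 ≤ a) (hab : a ≤ b) (hb : 1 ≤ b) : Int :=
  if a < n then
    loopB n b (a + b) (count + 1) (le_trans h0 hab) (by omega) (by omega)
  else count
termination_by ((n - a).toNat, (n - b).toNat)
decreasing_by
  rcases Int.lt_or_le a b with hlt | hge
  · exact Prod.Lex.left _ _ (by omega)
  · have h1 : (n - b).toNat = (n - a).toNat := by omega
    rw [h1]
    exact Prod.Lex.right _ (by omega)

def amount_fib_alt (n : Int) : Int :=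
  loopB n 0 1 0 (by omega) (by omega) (by omega)

-- ===== PRECONDITION & SPEC =====
def Spec_amount_fib (n : Int) (out : Int) : Prop := out = amount_fib_alt n
instance (n : Int) (out : Int) : Decidable (Spec_amount_fib n out) := by unfold Spec_amount_fib; infer_instance

-- ===== CLAIM (what is proved, stated in full; the proofs are below) =====
def Claim_equal_amount_fib : Prop := ∀ (n : Int), Dom_amount_fib n → Spec_amount_fib n (amount_fib n)

-- ===== LEMMAS AND PROOFS =====

-- Accumulator-free version of B's loop, used to relate the two programs.
def g (n a b : Int) (h0 : 0 ≤ a) (hab : a ≤ b) (hb : 1 ≤ b) : Int :=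
  if a < n then
    1 + g n b (a + b) (le_trans h0 hab) (by omega) (by omega)
  else 0
termination_by ((n - a).toNat, (n - b).toNat)
decreasing_by
  rcases Int.lt_or_le a b with hlt | hge
  · exact Prod.Lex.left _ _ (by omega)
  · have h1 : (n - b).toNat = (n - a).toNat := by omega
    rw [h1]
    exact Prod.Lex.right _ (by omega)

-- g with the loop condition false returns 0.
lemma g_zero (n a b : Int) (h0 : 0 ≤ a) (hab : a ≤ b) (hb : 1 ≤ b) (h : ¬ a < n) :
    g n a b h0 hab hb = 0 := by
  rw [g.eq_def, if_neg h]

lemma loopB_eq_g (n a b count : Int) (h0 : 0 ≤ a) (hab : a ≤ b) (hb : 1 ≤ b) :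
    loopB n a b count h0 hab hb = count + g n a b h0 hab hb := by
  fun_induction loopB n a b count h0 hab hb with
  | case1 a b count h0 hab hb hlt ih =>
      rw [ih]
      conv_rhs => rw [g.eq_def]
      rw [if_pos hlt]
      linarith
  | case2 a b count h0 hab hb hge =>
      rw [g_zero _ _ _ _ _ _ hge]
      ring

def countPure (n : Int) (seq : List Int) : Int :=
  ((seq.filter (fun x => x < n)).length : Int)

lemma countLoop_eq (n : Int) (seq : List Int) (e : Int) :
    countLoop n seq e = e + countPure n seq := by
  induction seq generalizing e with
  | nil => simp [countLoop, countPure]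
  | cons x rest ih =>
      by_cases hx : x < n
      · simp [countLoop, countPure, hx, ih]; ring
      · simp [countLoop, countPure, hx, ih]

lemma countPure_append (n : Int) (seq : List Int) (x : Int) :
    countPure n (seq ++ [x]) = countPure n seq + (if x < n then 1 else 0) := by
  by_cases hx : x < n <;> simp [countPure, List.filter_append, hx]

-- Key invariant: counting the final list produced by A's loop equals the count
-- of the current list plus B-style counting of the remaining fib terms.
lemma keyA (n a b : Int) (seq : List Int) (h0 : 0 ≤ a) (hab : a ≤ b) (hb : 1 ≤ b) :
    countPure n (loopA n a b seq h0 hab hb)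
      = countPure n seq
        + g n (a + b) (b + (a + b)) (by omega) (by omega) (by omega) := by
  fun_induction loopA n a b seq h0 hab hb with
  | case1 a b seq h0 hab hb hlt ih =>
      rw [ih, countPure_append]
      conv_rhs => rw [g.eq_def]
      by_cases hx : a + b < n
      · simp only [if_pos hx]
        linarith
      · simp only [if_neg hx]
        rw [g_zero _ _ _ _ _ _ (show ¬ b + (a + b) < n by omega)]
        ring
  | case2 a b seq h0 hab hb hge =>
      rw [g_zero _ _ _ _ _ _ (show ¬ a + b < n by omega)]
      ring

-- ===== VERDICT (by name: the statement is the Claim_ definition above) =====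
theorem amount_fib_spec : Claim_equal_amount_fib := by
  intro n _
  unfold Spec_amount_fib amount_fib amount_fib_alt
  by_cases h0 : n = 0
  · rw [if_pos h0, loopB.eq_def, if_neg (by omega)]
  rw [if_neg h0]
  by_cases h1 : n = 1
  · rw [if_pos h1, loopB.eq_def, if_pos (by omega), loopB.eq_def, if_neg (by omega)]; norm_num
  rw [if_neg h1, countLoop_eq, keyA]
  rcases (show n < 0 ∨ 2 ≤ n by omega) with hn | hn
  · rw [g_zero _ _ _ _ _ _ (by omega), loopB.eq_def, if_neg (by omega)]
    simp [countPure, show ¬ (0:Int) < n by omega, show ¬ (1:Int) < n by omega]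
  · rw [loopB.eq_def, if_pos (by omega), loopB.eq_def, if_pos (by omega), loopB_eq_g]
    have hcp : countPure n [0, 1] = 2 := by
      simp [countPure, show (0:Int) < n by omega, show (1:Int) < n by omega]
    rw [hcp]
    linarith
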